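-- pv_equiv track=rewrite | github.com/Watemlifts/Platform-Integration | homeassistant/helpers/translation.py | build_resources
-- ===== SOURCE A (Python) =====
-- from typing import Any, Dict, Iterable, Optional
--
-- def build_resources(translation_cache: Dict[str, Dict[str, Any]],
--                     components: Iterable[str]) -> Dict[str, Dict[str, Any]]:
--     """Build the resources response for the given components."""
--     # Build response
--     resources = {}  # type: Dict[str, Dict[str, Any]]
--     for component in components:
--         if '.' not in component:
--             domain = component
--         else:
--             domain = component.split('.', 1)[0]
--
--         if domain not in resources:
--             resources[domain] = {}
--
--         # Add the translations for this component to the domain resources.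
--         # Since clients cannot determine which platform an entity belongs to,
--         # all translations for a domain will be returned together.
--         resources[domain].update(translation_cache[component])
--
--     return resources
-- ===== SOURCE B (Python) =====
-- def build_resources(translation_cache, components):
--     """Build the resources response for the given components."""
--     # Pass 1: index components by their domain, in first-seen domain order.
--     by_domain = {}
--     for component in components:
--         by_domain.setdefault(component.split('.', 1)[0], []).append(component)
--     # Pass 2: merge each domain's component translations, in encountered order.
--     resources = {}
--     for domain, comps in by_domain.items():
--         merged = {}
--         for comp in comps:
--             merged.update(translation_cache[comp])
--         resources[domain] = merged
--     return resources
-- ===== Notes on version B (the rewrite author's own statement) =====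
-- stated objective: alternative
-- what changed: Replaces A's single interleaved loop (create-domain-if-missing then merge in place) by two separate passes: first build a domain -> components index with setdefault, then merge each domain's caches in a second pass over the index.
import Mathlib
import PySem

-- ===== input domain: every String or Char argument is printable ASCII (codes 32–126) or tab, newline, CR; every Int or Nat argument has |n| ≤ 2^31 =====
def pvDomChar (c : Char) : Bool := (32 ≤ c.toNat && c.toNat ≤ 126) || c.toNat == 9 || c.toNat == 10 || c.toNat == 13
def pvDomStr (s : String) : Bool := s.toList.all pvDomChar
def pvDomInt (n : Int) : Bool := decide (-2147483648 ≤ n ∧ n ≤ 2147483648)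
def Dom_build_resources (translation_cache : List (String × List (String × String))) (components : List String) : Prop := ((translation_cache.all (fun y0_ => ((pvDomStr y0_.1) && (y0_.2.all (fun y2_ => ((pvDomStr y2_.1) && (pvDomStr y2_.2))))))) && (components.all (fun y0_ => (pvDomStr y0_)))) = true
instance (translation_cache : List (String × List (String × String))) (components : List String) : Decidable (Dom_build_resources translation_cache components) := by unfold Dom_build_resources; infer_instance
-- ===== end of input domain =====

-- B replaces A's single interleaved loop by two passes (group components by domain, then merge per domain); equivalence of return values, no speed claim.


-- ===== PORT A =====
-- literal port of A: one loop; domain via the '.'-membership branch, create-if-missing, merge in place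
def build_resources (translation_cache : List (String × List (String × String))) (components : List String) : List (String × List (String × String)) :=
  let cache : PySem.Dict String (List (String × String)) := PySem.Dict.ofList translation_cache
  let resources : PySem.Dict String (PySem.Dict String String) :=
    components.foldl (fun resources component =>
      let domain : String :=
        if PySem.Str.isIn "." component then
          ((PySem.Str.splitMax? component "." 1).getD []).headD component
        else component
      let resources :=
        if resources.contains domain then resources
        else resources.insert domain PySem.Dict.empty
      -- resources[domain].update(translation_cache[component]); Pre_ guarantees the key is present
      resources.modify domain PySem.Dict.empty (fun d => d.update (cache.getD component []))
    ) PySem.Dict.empty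
  resources.items.map (fun p => (p.1, p.2.items))

-- ===== PORT B =====
-- B helper: component.split('.', 1)[0]
def pvSplitDomain (component : String) : String :=
  ((PySem.Str.splitMax? component "." 1).getD []).headD component

def build_resources_alt (translation_cache : List (String × List (String × String))) (components : List String) : List (String × List (String × String)) :=
  let cache : PySem.Dict String (List (String × String)) := PySem.Dict.ofList translation_cache
  -- pass 1: by_domain.setdefault(domain, []).append(component)
  let byDomain : PySem.Dict String (List String) :=
    components.foldl (fun d component => d.modify (pvSplitDomain component) [] (fun l => l ++ [component]))
      PySem.Dict.empty
  -- pass 2: merge each domain's component caches, in index order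
  let resources : PySem.Dict String (PySem.Dict String String) :=
    byDomain.items.foldl (fun res p =>
      res.insert p.1 (p.2.foldl (fun merged comp => merged.update (cache.getD comp [])) PySem.Dict.empty))
      PySem.Dict.empty
  resources.items.map (fun p => (p.1, p.2.items))

-- ===== PRECONDITION & SPEC =====
-- Pre_ excludes exactly the inputs on which A raises KeyError: a component missing from translation_cache.
def Pre_build_resources (translation_cache : List (String × List (String × String))) (components : List String) : Prop :=
  components.all (fun c => translation_cache.any (fun p => p.1 == c)) = true
instance (translation_cache : List (String × List (String × String))) (components : List String) : Decidable (Pre_build_resources translation_cache components) := by unfold Pre_build_resources; infer_instance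
def pvWitness_build_resources : (List (String × List (String × String))) × List String :=
  ([("light.hue", [("on", "An")]), ("switch", [("off", "Aus")])], ["light.hue", "switch", "light.hue"])

def Spec_build_resources (translation_cache : List (String × List (String × String))) (components : List String) (out : List (String × List (String × String))) : Prop := out = build_resources_alt translation_cache components
instance (translation_cache : List (String × List (String × String))) (components : List String) (out : List (String × List (String × String))) : Decidable (Spec_build_resources translation_cache components out) := by unfold Spec_build_resources; infer_instance

-- ===== CLAIM (what is proved, stated in full; the proofs are below) =====
def Claim_equal_build_resources : Prop := ∀ (translation_cache : List (String × List (String × String))) (components : List String), Dom_build_resources translation_cache components → Pre_build_resources translation_cache components → Spec_build_resources translation_cache components (build_resources translation_cache components)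

-- ===== LEMMAS AND PROOFS =====

-- merge of one domain's component caches (pass 2 body of B)
def pvMerge (cache : PySem.Dict String (List (String × String))) (cs : List String) : PySem.Dict String String :=
  cs.foldl (fun merged comp => merged.update (cache.getD comp [])) PySem.Dict.empty

-- render a domain index as the resources dict it denotes
def pvRender (cache : PySem.Dict String (List (String × String))) (idx : PySem.Dict String (List String)) : PySem.Dict String (PySem.Dict String String) :=
  PySem.Dict.mk (idx.items.map (fun p => (p.1, pvMerge cache p.2)))

-- splitOnMax.go on a string not containing the separator returns the whole rest
theorem pv_go_no_sep (sep : List Char) (fuel : Nat) : ∀ (m : Nat) (l cur : List Char) (acc : List (List Char)),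
    ¬ sep <:+: l →
    PySem.Chars.splitOnMax.go sep fuel m l cur acc = ((cur.reverse ++ l) :: acc).reverse := by
  induction fuel with
  | zero => intro m l cur acc h; simp [PySem.Chars.splitOnMax.go]
  | succ fuel ih =>
    intro m l cur acc h
    cases l with
    | nil => simp [PySem.Chars.splitOnMax.go]
    | cons c rest =>
      rw [PySem.Chars.splitOnMax.go]
      have hpre : sep.isPrefixOf (c :: rest) = false := by
        by_contra hx
        exact h (List.IsPrefix.isInfix (List.isPrefixOf_iff_prefix.mp (by revert hx; cases sep.isPrefixOf (c::rest) <;> simp)))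
      have hrest : ¬ sep <:+: rest := fun hx => h (hx.trans (List.suffix_cons c rest).isInfix)
      by_cases hm : m = 0
      · simp [hm]
      · simp [hm, hpre, ih m rest (c :: cur) acc hrest]

-- no '.' in s → s.split('.', 1)[0] = s
theorem pv_domain_no_dot (s : String) (h : PySem.Str.isIn "." s = false) :
    ((PySem.Str.splitMax? s "." 1).getD []).headD s = s := by
  have h2 : ¬ ['.'] <:+: s.toList := by
    rw [← PySem.Chars.isIn_eq_false_iff]
    simpa [PySem.Str.isIn] using h
  have e0 : ("." : String).toList = ['.'] := rfl
  have e1 : PySem.Chars.splitOnMax s.toList ['.'] 1 = [s.toList] := by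
    rw [PySem.Chars.splitOnMax, if_neg (by norm_num)]
    exact (pv_go_no_sep ['.'] _ _ _ _ _ h2).trans (by simp)
  rw [PySem.Str.splitMax?, e0, PySem.Chars.splitMax?, if_neg (by simp), e1]
  simp

-- A's branched domain computation IS B's unconditional split
theorem pv_dom_eq (c : String) :
    (if PySem.Str.isIn "." c then ((PySem.Str.splitMax? c "." 1).getD []).headD c else c) = pvSplitDomain c := by
  cases h : PySem.Str.isIn "." c
  · simp only [Bool.false_eq_true, if_false, pvSplitDomain, pv_domain_no_dot c h]
  · simp only [if_true, pvSplitDomain]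

-- get? through a value-map of the items
theorem pv_get?_map_val (items : List (String × List String)) (f : List String → PySem.Dict String String) (k : String) :
    (PySem.Dict.mk (items.map (fun (p : String × List String) => (p.1, f p.2)))).get? k = ((PySem.Dict.mk items).get? k).map f := by
  have hfind : ∀ (its : List (String × List String)),
      List.find? (fun p => p.1 == k) (its.map (fun p => (p.1, f p.2)))
        = (List.find? (fun (p : String × List String) => p.1 == k) its).map (fun p => (p.1, f p.2)) := by
    intro its
    induction its with
    | nil => rfl
    | cons a t ih => cases h : a.1 == k <;> simp [h, ih]
  simp [PySem.Dict.get?, hfind, Option.map_map]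
  rfl

theorem pv_contains_render (cache : PySem.Dict String (List (String × String))) (idx : PySem.Dict String (List String)) (k : String) :
    (pvRender cache idx).contains k = idx.contains k := by
  simp only [pvRender, PySem.Dict.contains, List.any_map]
  rfl

theorem pv_getD_render (cache : PySem.Dict String (List (String × String))) (idx : PySem.Dict String (List String)) (k : String) :
    (pvRender cache idx).getD k PySem.Dict.empty = pvMerge cache (idx.getD k []) := by
  rw [PySem.Dict.getD, PySem.Dict.getD, pvRender, pv_get?_map_val]
  cases h : idx.get? k
  · rfl
  · rfl

-- rendering commutes with insert
theorem pv_render_insert (cache : PySem.Dict String (List (String × String))) (idx : PySem.Dict String (List String)) (d : String) (v : List String) :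
    pvRender cache (idx.insert d v) = (pvRender cache idx).insert d (pvMerge cache v) := by
  have hcr := pv_contains_render cache idx d
  cases h : idx.contains d with
  | true =>
    rw [h] at hcr
    apply PySem.Dict.ext
    simp only [pvRender] at hcr ⊢
    simp only [PySem.Dict.insert, h, hcr, if_true, List.map_map]
    apply List.map_congr_left
    intro p _
    cases hp : p.1 == d <;> simp [hp, Function.comp]
  | false =>
    rw [h] at hcr
    apply PySem.Dict.ext
    simp only [pvRender] at hcr ⊢
    simp only [PySem.Dict.insert, h, hcr, Bool.false_eq_true, if_false, List.map_append,
      List.map_cons, List.map_nil]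

-- inserting twice at the same key keeps only the second value
theorem pv_insert_insert (r : PySem.Dict String (PySem.Dict String String)) (k : String) (v w : PySem.Dict String String) :
    (r.insert k v).insert k w = r.insert k w := by
  have h2 : (r.insert k v).contains k = true := by simp
  cases h : r.contains k with
  | true =>
    simp only [PySem.Dict.insert, h, if_true] at h2 ⊢
    apply PySem.Dict.ext
    simp only [h2, if_true, List.map_map]
    apply List.map_congr_left
    intro p _
    cases hp : p.1 == k <;> simp [hp, Function.comp]
  | false =>
    have hall : ∀ p ∈ r.items, (p.1 == k) = false := by
      intro p hp
      cases hx : p.1 == k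
      · rfl
      · exfalso
        rw [show r.contains k = (r.items.any fun p => p.1 == k) from rfl] at h
        rw [List.any_eq_false] at h
        exact h p hp (by simp [hx])
    simp only [PySem.Dict.insert, h, Bool.false_eq_true, if_false] at h2 ⊢
    apply PySem.Dict.ext
    simp only [h2, if_true, List.map_append, List.map_cons, List.map_nil]
    have hid : ∀ p ∈ r.items, (if (p.1 == k) = true then (k, w) else p) = p := by
      intro p hp
      rw [if_neg (by simp [hall p hp])]
    rw [List.map_congr_left hid]
    simp

-- one loop step of A equals one index step of B, through pvRender
theorem pv_step (cache : PySem.Dict String (List (String × String))) (idx : PySem.Dict String (List String)) (c : String) :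
    ((if (pvRender cache idx).contains (pvSplitDomain c) then pvRender cache idx
      else (pvRender cache idx).insert (pvSplitDomain c) PySem.Dict.empty).modify
        (pvSplitDomain c) PySem.Dict.empty (fun d => d.update (cache.getD c [])))
    = pvRender cache (idx.modify (pvSplitDomain c) [] (fun l => l ++ [c])) := by
  rw [PySem.Dict.modify, PySem.Dict.modify]
  by_cases h : idx.contains (pvSplitDomain c) = true
  · rw [if_pos (by rw [pv_contains_render]; exact h)]
    rw [pv_render_insert, pv_getD_render]
    congr 1
    simp [pvMerge, List.foldl_append]
  · rw [if_neg (by rw [pv_contains_render]; exact h)]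
    rw [PySem.Dict.getD_insert_self, pv_insert_insert, pv_render_insert,
        PySem.Dict.getD_of_not_contains idx [] (by simpa using h)]
    congr 1

-- A's whole loop, run from a rendered index, renders B's index loop
theorem pv_fold (cache : PySem.Dict String (List (String × String))) (components : List String) :
    ∀ idx : PySem.Dict String (List String),
    components.foldl (fun resources component =>
        (if resources.contains (pvSplitDomain component) then resources
         else resources.insert (pvSplitDomain component) PySem.Dict.empty).modify
          (pvSplitDomain component) PySem.Dict.empty (fun d => d.update (cache.getD component []))) (pvRender cache idx)
    = pvRender cache (components.foldl (fun d component => d.modify (pvSplitDomain component) [] (fun l => l ++ [component])) idx) := by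
  induction components with
  | nil => intro idx; rfl
  | cons c t ih =>
    intro idx
    simp only [List.foldl_cons]
    rw [pv_step cache idx c]
    exact ih _

-- ===== VERDICT (by name: the statement is the Claim_ definition above) =====
theorem build_resources_spec : Claim_equal_build_resources := by
  intro translation_cache components _ _
  show build_resources translation_cache components = build_resources_alt translation_cache components
  rw [build_resources, build_resources_alt]
  simp only [pv_dom_eq]
  set cache := PySem.Dict.ofList translation_cache with hc
  set byDomain := components.foldl (fun d component => d.modify (pvSplitDomain component) [] (fun l => l ++ [component])) PySem.Dict.empty with hbd
  have hnodup : (byDomain.items.map (fun p => p.1)).Nodup := by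
    have := PySem.Dict.nodup_keys_foldl_modify_key components pvSplitDomain [] (fun _ component => fun l => l ++ [component]) PySem.Dict.empty (by simp [PySem.Dict.keys, PySem.Dict.empty])
    simpa [PySem.Dict.keys, hbd] using this
  have hB := PySem.Dict.items_foldl_insert_fresh byDomain.items (fun p => p.1)
      (fun p => pvMerge cache p.2) PySem.Dict.empty (by intro a _; simp [PySem.Dict.contains, PySem.Dict.empty]) hnodup
  simp only [pvMerge] at hB
  simp only [show (PySem.Dict.empty : PySem.Dict String (PySem.Dict String String)).items = [] from rfl, List.nil_append] at hB
  rw [hB]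
  have hA := pv_fold cache components PySem.Dict.empty
  have hren : pvRender cache PySem.Dict.empty = PySem.Dict.empty := rfl
  rw [hren] at hA
  rw [hA, ← hbd]
  simp [pvRender, pvMerge]
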